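-- pv_equiv track=rewrite | github.com/ritik-sri/LeetCode-Problem-Solution-in-PYTHON | Distinct Difference - GFG/distinct-difference.py | getDistinctDifference
-- ===== SOURCE A (Python) =====
-- from typing import List
--
-- def getDistinctDifference(N : int, A : List[int]) -> List[int]:
--     s1=set()
--     s2=set()
--     left=[]
--     right=[]
--     for i in range(N):
--         left.append(len(s1))
--         s1.add(A[i])
--
--     for j in range(len(A)-1,-1,-1):
--         right.append(len(s2))
--         s2.add(A[j])
--     right=right[::-1]
--     res=[]
--     for i in range(N):
--         res.append(left[i]-right[i])
--     return res
-- ===== SOURCE B (Python) =====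
-- from typing import List
-- from collections import Counter
--
-- def getDistinctDifference(N : int, A : List[int]) -> List[int]:
--     suffix = Counter(A)
--     prefix = set()
--     res = []
--     for i in range(N):
--         x = A[i]
--         suffix[x] -= 1
--         if suffix[x] == 0:
--             del suffix[x]
--         res.append(len(prefix) - len(suffix))
--         prefix.add(x)
--     return res
-- ===== Notes on version B (the rewrite author's own statement) =====
-- stated objective: simpler
-- what changed: Replaces A's three passes with prefix/suffix snapshot arrays by one forward pass that maintains a prefix set and a dynamically decremented suffix Counter, emitting len(prefix)-len(suffix) directly.
import Mathlib
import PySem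

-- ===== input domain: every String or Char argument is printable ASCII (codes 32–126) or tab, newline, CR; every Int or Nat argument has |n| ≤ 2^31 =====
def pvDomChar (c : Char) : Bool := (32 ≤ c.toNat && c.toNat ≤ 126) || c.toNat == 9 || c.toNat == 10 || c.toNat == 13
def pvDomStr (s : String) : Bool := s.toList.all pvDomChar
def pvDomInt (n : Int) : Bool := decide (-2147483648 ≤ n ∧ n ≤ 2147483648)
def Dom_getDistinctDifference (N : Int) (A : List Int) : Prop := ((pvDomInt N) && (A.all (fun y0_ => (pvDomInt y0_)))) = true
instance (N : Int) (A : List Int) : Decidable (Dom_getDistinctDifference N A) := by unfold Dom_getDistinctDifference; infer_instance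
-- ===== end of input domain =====

-- B replaces A's three passes (prefix-count array, suffix-count array, difference pass)
-- by one forward pass over a prefix set and a dynamically decremented suffix counter.


-- ===== PORT A =====
def getDistinctDifference (N : Int) (A : List Int) : List Int :=
  -- s1 = set(); left = []; for i in range(N): left.append(len(s1)); s1.add(A[i])
  let st1 := (PySem.List.pyRange 0 N 1).foldl
    (fun (st : PySem.Set Int × List Int) i =>
      (PySem.Set.add st.1 (PySem.List.pyGetD A i 0), st.2 ++ [(st.1.length : Int)]))
    (PySem.Set.empty, [])
  let left := st1.2
  -- s2 = set(); right = []; for j in range(len(A)-1,-1,-1): right.append(len(s2)); s2.add(A[j])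
  let st2 := (PySem.List.pyRange ((A.length : Int) - 1) (-1) (-1)).foldl
    (fun (st : PySem.Set Int × List Int) j =>
      (PySem.Set.add st.1 (PySem.List.pyGetD A j 0), st.2 ++ [(st.1.length : Int)]))
    (PySem.Set.empty, [])
  let right := st2.2.reverse
  -- res = []; for i in range(N): res.append(left[i]-right[i])
  (PySem.List.pyRange 0 N 1).foldl
    (fun res i => res ++ [PySem.List.pyGetD left i 0 - PySem.List.pyGetD right i 0]) []

-- ===== PORT B =====
def getDistinctDifference_alt (N : Int) (A : List Int) : List Int :=
  -- suffix = Counter(A); prefix = set(); res = []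
  -- for i in range(N): x = A[i]; suffix[x] -= 1; if suffix[x] == 0: del suffix[x]
  --                    res.append(len(prefix) - len(suffix)); prefix.add(x)
  let st := (PySem.List.pyRange 0 N 1).foldl
    (fun (st : PySem.Dict Int Int × PySem.Set Int × List Int) i =>
      let x := PySem.List.pyGetD A i 0
      let s1 := st.1.modify x 0 (· - 1)
      let s2 := if s1.getD x 0 == 0 then s1.erase x else s1
      (s2, PySem.Set.add st.2.1 x, st.2.2 ++ [((st.2.1.length : Int) - (s2.size : Int))]))
    (PySem.Dict.counter A, PySem.Set.empty, [])
  st.2.2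

-- ===== PRECONDITION & SPEC =====
-- Pre_ excludes exactly the inputs where A raises IndexError (N > len(A): A[i] out of range).
def Pre_getDistinctDifference (N : Int) (A : List Int) : Prop := N ≤ (A.length : Int)
instance (N : Int) (A : List Int) : Decidable (Pre_getDistinctDifference N A) := by unfold Pre_getDistinctDifference; infer_instance
def pvWitness_getDistinctDifference : Int × List Int := (4, [1, 2, 1, 3])

def Spec_getDistinctDifference (N : Int) (A : List Int) (out : List Int) : Prop := out = getDistinctDifference_alt N A
instance (N : Int) (A : List Int) (out : List Int) : Decidable (Spec_getDistinctDifference N A out) := by unfold Spec_getDistinctDifference; infer_instance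

-- ===== CLAIM (what is proved, stated in full; the proofs are below) =====
def Claim_equal_getDistinctDifference : Prop := ∀ (N : Int) (A : List Int), Dom_getDistinctDifference N A → Pre_getDistinctDifference N A → Spec_getDistinctDifference N A (getDistinctDifference N A)

-- ===== LEMMAS AND PROOFS =====

-- number of distinct elements of l, as Int
def dc (l : List Int) : Int := ((PySem.Set.ofList l).length : Int)

lemma len_eq_dc (s l : List Int) (h1 : s.Nodup) (h2 : ∀ x, x ∈ s ↔ x ∈ l) :
    (s.length : Int) = dc l := by
  have hs : s.toFinset = (PySem.Set.ofList l).toFinset := by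
    ext x
    simp [List.mem_toFinset, h2, PySem.Set.mem_ofList]
  have h1' := List.toFinset_card_of_nodup h1
  have h2' := List.toFinset_card_of_nodup (PySem.Set.nodup_ofList l)
  unfold dc
  rw [hs] at h1'
  omega

lemma nodup_add (s : List Int) (x : Int) (h : s.Nodup) : (PySem.Set.add s x).Nodup := by
  unfold PySem.Set.add
  split
  · exact h
  · rename_i hc
    simp only [List.nodup_append, List.nodup_cons]
    refine ⟨h, by simp, ?_⟩
    intro a ha b hb
    simp only [List.mem_singleton] at hb
    subst hb
    intro hax
    subst hax
    have : PySem.Set.contains s a = true := by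
      simp [PySem.Set.contains, ha]
    exact absurd this (by simpa using hc)

lemma pyRange_zero_nonpos (N : Int) (h : N ≤ 0) : PySem.List.pyRange 0 N 1 = [] := by
  simp [PySem.List.pyRange]
  omega

lemma pyRange_desc (L : Nat) :
    PySem.List.pyRange ((L : Int) - 1) (-1) (-1)
      = (List.range L).map (fun k : Nat => (L : Int) - 1 - (k : Int)) := by
  unfold PySem.List.pyRange
  norm_num
  rcases Nat.eq_zero_or_pos L with h | h
  · subst h; norm_num
  · have h1 : (-1 : Int) < (L : Int) - 1 := by omega
    rw [if_pos h]
    congr 1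

lemma erase_items_find? (l : List (Int × Int)) (k k' : Int) :
    (l.filter (fun p => !(p.1 == k))).find? (fun p => p.1 == k')
      = if k' = k then none else l.find? (fun p => p.1 == k') := by
  induction l with
  | nil => simp
  | cons p t ih =>
    simp only [List.filter_cons]
    by_cases hpk : p.1 = k
    · rw [if_neg (by simp [hpk]), ih]
      split_ifs with h
      · rfl
      · rw [List.find?_cons_of_neg (by simp [hpk]; omega)]
    · rw [if_pos (by simp [hpk])]
      by_cases hpk' : p.1 = k'
      · rw [List.find?_cons_of_pos (by simp [hpk']),
            if_neg (by omega),
            List.find?_cons_of_pos (by simp [hpk'])]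
      · rw [List.find?_cons_of_neg (by simp [hpk']), ih]
        split_ifs with h
        · rfl
        · rw [List.find?_cons_of_neg (by simp [hpk'])]

lemma erase_getD (d : PySem.Dict Int Int) (k k' : Int) (v : Int) :
    (d.erase k).getD k' v = if k' = k then v else d.getD k' v := by
  show ((((d.items.filter (fun p => !(p.1 == k))).find? (fun p => p.1 == k')).map (·.2)).getD v) = _
  rw [erase_items_find?]
  split_ifs with h
  · rfl
  · rfl

lemma erase_keys (d : PySem.Dict Int Int) (k : Int) :
    (d.erase k).keys = d.keys.filter (fun a => !(a == k)) := by
  show (d.items.filter (fun p => !(p.1 == k))).map (·.1) = (d.items.map (·.1)).filter (fun a => !(a == k))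
  rw [List.filter_map]
  rfl

lemma size_eq_keys_length (d : PySem.Dict Int Int) : d.size = d.keys.length := by
  simp [PySem.Dict.size, PySem.Dict.keys]

lemma prefix_fold (A : List Int) (n : Nat) (hn : n ≤ A.length) :
    ((List.range n).map (fun k : Nat => (k : Int))).foldl
      (fun (st : PySem.Set Int × List Int) i =>
        (PySem.Set.add st.1 (PySem.List.pyGetD A i 0), st.2 ++ [(st.1.length : Int)]))
      (PySem.Set.empty, [])
    = (PySem.Set.ofList (A.take n), (List.range n).map (fun i => dc (A.take i))) := by
  induction n with
  | zero => simp [PySem.Set.empty, PySem.Set.ofList]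
  | succ m ih =>
    have hm : m ≤ A.length := by omega
    rw [List.range_succ]
    simp only [List.map_append, List.foldl_append]
    rw [ih hm]
    simp only [List.map_cons, List.map_nil, List.foldl_cons, List.foldl_nil]
    have hget : PySem.List.pyGetD A (m : Int) 0 = A[m] := by
      rw [PySem.List.pyGetD_natCast]
      exact List.getD_eq_getElem _ _ (by omega)
    rw [hget]
    have htake : A.take (m + 1) = A.take m ++ [A[m]] := by
      rw [List.take_add_one]
      simp [List.getElem?_eq_getElem (show m < A.length by omega)]
    simp only [Prod.mk.injEq]
    refine ⟨?_, rfl⟩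
    rw [htake]
    conv_rhs => rw [PySem.Set.ofList_eq_foldl, List.foldl_append, ← PySem.Set.ofList_eq_foldl]
    rfl

lemma suffix_fold (A : List Int) :
    ∀ (j : Nat), j ≤ A.length → ∀ (s acc : List Int), s.Nodup → (∀ x, x ∈ s ↔ x ∈ A.drop j) →
    (((List.range j).map (fun k : Nat => (j : Int) - 1 - (k : Int))).foldl
      (fun (st : PySem.Set Int × List Int) i =>
        (PySem.Set.add st.1 (PySem.List.pyGetD A i 0), st.2 ++ [(st.1.length : Int)]))
      (s, acc)).2
    = acc ++ (List.range j).map (fun t => dc (A.drop (j - t))) := by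
  intro j
  induction j with
  | zero => intro _ s acc _ _; simp
  | succ m ih =>
    intro hj s acc hnd hmem
    have hidx : ((List.range (m+1)).map (fun k : Nat => ((m+1 : Nat) : Int) - 1 - (k : Int)))
        = (m : Int) :: ((List.range m).map (fun k : Nat => (m : Int) - 1 - (k : Int))) := by
      rw [List.range_succ_eq_map, List.map_cons, List.map_map]
      refine congrArg₂ _ (by push_cast; ring) ?_
      exact List.map_congr_left (fun k _ => by simp [Function.comp]; ring)
    rw [hidx, List.foldl_cons]
    have hget : PySem.List.pyGetD A (m : Int) 0 = A[m]'(by omega) := by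
      rw [PySem.List.pyGetD_natCast]
      exact List.getD_eq_getElem _ _ (by omega)
    have hdropm : A.drop m = A[m]'(by omega) :: A.drop (m+1) := by
      exact List.drop_eq_getElem_cons (by omega)
    rw [hget]
    have hlen : (s.length : Int) = dc (A.drop (m+1)) := len_eq_dc s _ hnd hmem
    have := ih (by omega) (PySem.Set.add s (A[m]'(by omega))) (acc ++ [(s.length : Int)])
      (nodup_add _ _ hnd)
      (by
        intro x
        rw [PySem.Set.mem_add, hmem x, hdropm, List.mem_cons]
        tauto)
    rw [this]
    rw [List.range_succ_eq_map, List.map_cons, List.map_map]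
    simp only [Nat.sub_zero, List.append_assoc, List.singleton_append]
    congr 1
    rw [hlen]
    congr 1
    exact List.map_congr_left (fun t _ => by simp [Function.comp])

lemma right_rev (A : List Int) :
    ((List.range A.length).map (fun t => dc (A.drop (A.length - t)))).reverse
      = (List.range A.length).map (fun i => dc (A.drop (i + 1))) := by
  apply List.ext_getElem
  · simp
  · intro i h1 h2
    simp only [List.getElem_reverse, List.getElem_map, List.getElem_range]
    simp only [List.length_reverse, List.length_map, List.length_range] at h1 h2
    rw [List.length_map, List.length_range]
    have he : A.length - (A.length - 1 - i) = i + 1 := by omega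
    rw [he]

lemma a_eval (A : List Int) (n : Nat) (hn : n ≤ A.length) :
    getDistinctDifference (n : Int) A
      = (List.range n).map (fun i => dc (A.take i) - dc (A.drop (i + 1))) := by
  unfold getDistinctDifference
  dsimp only
  rw [PySem.List.pyRange_zero_natCast, pyRange_desc A.length]
  rw [prefix_fold A n hn]
  rw [suffix_fold A A.length le_rfl PySem.Set.empty [] (by simp [PySem.Set.empty]) (by simp [PySem.Set.empty])]
  simp only [List.nil_append]
  rw [right_rev A]
  rw [List.foldl_map]
  rw [PySem.List.foldl_append_singleton_eq_map
    (f := fun k : Nat =>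
      PySem.List.pyGetD ((List.range n).map (fun i => dc (A.take i))) (k : Int) 0
        - PySem.List.pyGetD ((List.range A.length).map (fun i => dc (A.drop (i + 1)))) (k : Int) 0)]
  simp only [List.nil_append]
  apply List.map_congr_left
  intro k hk
  have hkn : k < n := List.mem_range.mp hk
  rw [PySem.List.pyGetD_natCast, PySem.List.pyGetD_natCast,
      PySem.List.getD_map_range _ _ _ _ hkn,
      PySem.List.getD_map_range _ _ _ _ (by omega)]

lemma dict_step (d : PySem.Dict Int Int) (x : Int) (t : List Int)
    (hnd : d.keys.Nodup)
    (hgetD : ∀ y, d.getD y 0 = (((x :: t).count y : Nat) : Int))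
    (hcont : ∀ y, d.contains y = true ↔ (x :: t).count y ≠ 0) :
    ((if (d.modify x 0 (· - 1)).getD x 0 == 0 then (d.modify x 0 (· - 1)).erase x else d.modify x 0 (· - 1)).keys.Nodup)
    ∧ (∀ y, (if (d.modify x 0 (· - 1)).getD x 0 == 0 then (d.modify x 0 (· - 1)).erase x else d.modify x 0 (· - 1)).getD y 0 = ((t.count y : Nat) : Int))
    ∧ (∀ y, (if (d.modify x 0 (· - 1)).getD x 0 == 0 then (d.modify x 0 (· - 1)).erase x else d.modify x 0 (· - 1)).contains y = true ↔ t.count y ≠ 0)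
    ∧ (((if (d.modify x 0 (· - 1)).getD x 0 == 0 then (d.modify x 0 (· - 1)).erase x else d.modify x 0 (· - 1)).size : Int) = dc t) := by
  have hs1getD : ∀ y, (d.modify x 0 (· - 1)).getD y 0 = ((t.count y : Nat) : Int) := by
    intro y
    rw [PySem.Dict.getD_modify]
    by_cases hyx : y = x
    · subst hyx
      rw [if_pos rfl, hgetD]
      simp
    · rw [if_neg hyx, hgetD]
      simp [List.count_cons]
      intro h
      exact absurd h.symm hyx
  have hs1cont : ∀ y, (d.modify x 0 (· - 1)).contains y = (y == x || d.contains y) := by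
    intro y; exact PySem.Dict.contains_modify d x y 0 _
  have hs1nd : (d.modify x 0 (· - 1)).keys.Nodup := by
    rw [PySem.Dict.keys_modify]
    exact PySem.Dict.nodup_keys_insert d x _ hnd
  have hcount_ne : ∀ y, y ≠ x → ((x :: t).count y = t.count y) := by
    intro y hyx
    simp [List.count_cons]
    intro h
    exact absurd h.symm hyx
  by_cases hc : t.count x = 0
  · rw [if_pos (by rw [hs1getD]; simp [hc])]
    have hkeys := erase_keys (d.modify x 0 (· - 1)) x
    have hs2nd : ((d.modify x 0 (· - 1)).erase x).keys.Nodup := by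
      rw [hkeys]; exact hs1nd.filter _
    have hs2cont : ∀ y, ((d.modify x 0 (· - 1)).erase x).contains y = true ↔ t.count y ≠ 0 := by
      intro y
      rw [PySem.Dict.contains_iff_mem_keys, hkeys, List.mem_filter]
      by_cases hyx : y = x
      · subst hyx; simp [hc]
      · simp only [ne_eq, hyx, not_false_eq_true, and_true, Bool.not_eq_eq_eq_not,
                   Bool.not_true, beq_eq_false_iff_ne]
        rw [← PySem.Dict.contains_iff_mem_keys, hs1cont]
        have hbx : (y == x) = false := by simp [hyx]
        rw [hbx, Bool.false_or, hcont, hcount_ne y hyx]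
    refine ⟨hs2nd, ?_, hs2cont, ?_⟩
    · intro y
      rw [erase_getD]
      by_cases hyx : y = x
      · subst hyx; simp [hc]
      · rw [if_neg hyx, hs1getD]
    · rw [size_eq_keys_length]
      apply len_eq_dc _ _ hs2nd
      intro y
      rw [← PySem.Dict.contains_iff_mem_keys, hs2cont]
      rw [ne_eq, List.count_eq_zero]
      tauto
  · rw [if_neg (by rw [hs1getD]; simp [hc])]
    have hs2cont : ∀ y, (d.modify x 0 (· - 1)).contains y = true ↔ t.count y ≠ 0 := by
      intro y
      rw [hs1cont]
      by_cases hyx : y = x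
      · subst hyx; simp [hc]
      · have hbx : (y == x) = false := by simp [hyx]
        rw [hbx, Bool.false_or, hcont, hcount_ne y hyx]
    refine ⟨hs1nd, hs1getD, hs2cont, ?_⟩
    rw [size_eq_keys_length]
    apply len_eq_dc _ _ hs1nd
    intro y
    rw [← PySem.Dict.contains_iff_mem_keys, hs2cont]
    rw [ne_eq, List.count_eq_zero]
    tauto

lemma b_fold (A : List Int) (n : Nat) (hn : n ≤ A.length) :
    (let r := (((List.range n).map (fun k : Nat => (k : Int))).foldl
      (fun (st : PySem.Dict Int Int × PySem.Set Int × List Int) i =>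
        let x := PySem.List.pyGetD A i 0
        let s1 := st.1.modify x 0 (· - 1)
        let s2 := if s1.getD x 0 == 0 then s1.erase x else s1
        (s2, PySem.Set.add st.2.1 x, st.2.2 ++ [((st.2.1.length : Int) - (s2.size : Int))]))
      (PySem.Dict.counter A, PySem.Set.empty, []))
    r.2.2 = (List.range n).map (fun i => dc (A.take i) - dc (A.drop (i + 1)))
    ∧ r.1.keys.Nodup
    ∧ (∀ x, r.1.getD x 0 = ((A.drop n).count x : Int))
    ∧ (∀ x, r.1.contains x = true ↔ (A.drop n).count x ≠ 0)
    ∧ r.2.1.Nodup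
    ∧ (∀ x, x ∈ r.2.1 ↔ x ∈ A.take n)) := by
  induction n with
  | zero =>
    simp only [List.range_zero, List.map_nil, List.foldl_nil]
    refine ⟨by simp, PySem.Dict.nodup_keys_counter A, ?_, ?_, by simp [PySem.Set.empty], by simp [PySem.Set.empty]⟩
    · intro x; simp only [List.drop_zero]; exact PySem.Dict.getD_counter A x
    · intro x
      simp only [List.drop_zero]
      rw [PySem.Dict.contains_counter]
      constructor
      · intro h hc
        rw [List.count_eq_zero] at hc
        exact hc (by simpa using h)
      · intro h
        simp only [List.contains_eq_mem, decide_eq_true_eq]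
        by_contra hmem
        exact h (List.count_eq_zero.mpr hmem)
  | succ m ih =>
    have hm : m ≤ A.length := by omega
    obtain ⟨hres, hdnd, hdgetD, hdcont, hpnd, hpmem⟩ := ih hm
    rw [List.range_succ]
    simp only [List.map_append, List.foldl_append, List.map_cons, List.map_nil,
               List.foldl_cons, List.foldl_nil]
    have hmlt : m < A.length := by omega
    have hget : PySem.List.pyGetD A (m : Int) 0 = A[m] := by
      rw [PySem.List.pyGetD_natCast]
      exact List.getD_eq_getElem _ _ hmlt
    have hdropm : A.drop m = A[m] :: A.drop (m + 1) := List.drop_eq_getElem_cons hmlt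
    have htake : A.take (m + 1) = A.take m ++ [A[m]] := by
      rw [List.take_add_one]
      simp [List.getElem?_eq_getElem hmlt]
    rw [hget]
    rw [hdropm] at hdgetD hdcont
    obtain ⟨hs2nd, hs2getD, hs2cont, hs2size⟩ :=
      dict_step _ (A[m]) (A.drop (m + 1)) hdnd hdgetD hdcont
    refine ⟨?_, hs2nd, hs2getD, hs2cont, nodup_add _ _ hpnd, ?_⟩
    · rw [hres, hs2size, len_eq_dc _ _ hpnd hpmem]
    · intro y
      rw [PySem.Set.mem_add, hpmem y, htake, List.mem_append, List.mem_singleton]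

lemma b_eval (A : List Int) (n : Nat) (hn : n ≤ A.length) :
    getDistinctDifference_alt (n : Int) A
      = (List.range n).map (fun i => dc (A.take i) - dc (A.drop (i + 1))) := by
  unfold getDistinctDifference_alt
  dsimp only
  rw [PySem.List.pyRange_zero_natCast]
  exact (b_fold A n hn).1

-- ===== VERDICT (by name: the statement is the Claim_ definition above) =====
theorem getDistinctDifference_spec : Claim_equal_getDistinctDifference := by
  intro N A _ hPre
  unfold Spec_getDistinctDifference
  by_cases h0 : 0 ≤ N
  · have hN : N = ((N.toNat : Nat) : Int) := (Int.toNat_of_nonneg h0).symm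
    have hle : N.toNat ≤ A.length := by
      unfold Pre_getDistinctDifference at hPre; omega
    rw [hN, a_eval A N.toNat hle, b_eval A N.toNat hle]
  · have hneg : N ≤ 0 := by omega
    unfold getDistinctDifference getDistinctDifference_alt
    rw [pyRange_zero_nonpos N hneg]
    simp
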